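-- pv_equiv track=rewrite | github.com/commitsession/pythonSpider | chunsheng/chunsheng.py | scheduling_reminder
-- ===== SOURCE A (Python) =====
-- def scheduling_reminder(delta_time, is_rest):
--     for n in range(365):
--         if (int(delta_time) - n * 4) == 1:
--             scheduling_message = '，你上白班'
--         elif (int(delta_time) - n * 4) == 2:
--             scheduling_message = '，你上夜班'
--         elif (int(delta_time) - n * 4) == 3:
--             scheduling_message = '，你休息的第一天'
--         elif (int(delta_time) - n * 4) == 4:
--             scheduling_message = '，你休息的最后一天'
--     return scheduling_message
-- ===== SOURCE B (Python) =====
-- # Closed-form by residue mod 4 instead of scanning 365 candidates.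
-- _SHIFT_MSG = {1: '\uff0c\u4f60\u4e0a\u767d\u73ed',
--               2: '\uff0c\u4f60\u4e0a\u591c\u73ed',
--               3: '\uff0c\u4f60\u4f11\u606f\u7684\u7b2c\u4e00\u5929',
--               0: '\uff0c\u4f60\u4f11\u606f\u7684\u6700\u540e\u4e00\u5929'}
--
-- def scheduling_reminder(delta_time, is_rest):
--     return _SHIFT_MSG[int(delta_time) % 4]
-- ===== Notes on version B (the rewrite author's own statement) =====
-- stated objective: simpler
-- what changed: Replaces the fixed 365-iteration scan for the unique n with delta_time-4n in 1..4 by a single dict lookup keyed on delta_time % 4; Pre_ excludes delta_time outside [1,1460], where A's loop never assigns scheduling_message and raises UnboundLocalError.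
import Mathlib
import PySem

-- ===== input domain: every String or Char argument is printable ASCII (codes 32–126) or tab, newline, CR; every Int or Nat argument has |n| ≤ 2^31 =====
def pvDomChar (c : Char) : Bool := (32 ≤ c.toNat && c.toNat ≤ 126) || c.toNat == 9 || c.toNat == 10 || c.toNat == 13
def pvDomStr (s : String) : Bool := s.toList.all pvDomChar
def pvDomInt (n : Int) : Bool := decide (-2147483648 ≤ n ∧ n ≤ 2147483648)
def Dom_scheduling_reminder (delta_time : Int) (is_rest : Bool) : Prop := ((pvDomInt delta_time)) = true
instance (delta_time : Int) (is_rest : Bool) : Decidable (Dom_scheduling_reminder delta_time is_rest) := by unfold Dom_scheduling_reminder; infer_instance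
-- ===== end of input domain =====

-- B replaces A's 365-iteration scan by a single dict lookup on delta_time % 4 (same value wherever A returns).

-- ===== PORT A =====
-- one loop iteration: the four-way elif chain updating scheduling_message (none = still unassigned)
def schedStep (d : Int) (acc : Option String) (n : Int) : Option String :=
  if d - n * 4 = 1 then some "，你上白班"
  else if d - n * 4 = 2 then some "，你上夜班"
  else if d - n * 4 = 3 then some "，你休息的第一天"
  else if d - n * 4 = 4 then some "，你休息的最后一天"
  else acc

-- 'none' at the end = scheduling_message unassigned = UnboundLocalError; Pre_ excludes those inputs
def scheduling_reminder (delta_time : Int) (is_rest : Bool) : String :=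
  (((PySem.List.pyRange 0 365 1).foldl (schedStep delta_time) none).getD "")

-- ===== PORT B =====
def scheduling_reminder_alt (delta_time : Int) (is_rest : Bool) : String :=
  ((PySem.Dict.ofList [((1 : Int), "，你上白班"), (2, "，你上夜班"),
      (3, "，你休息的第一天"), (0, "，你休息的最后一天")]).get?
    (PySem.Int.mod delta_time 4)).getD ""
  -- the key delta_time % 4 is always in {0,1,2,3}, so the KeyError default "" is unreachable

-- ===== PRECONDITION & SPEC =====
-- exactly the inputs where A's loop assigns scheduling_message; elsewhere A raises UnboundLocalError
def Pre_scheduling_reminder (delta_time : Int) (is_rest : Bool) : Prop :=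
  1 ≤ delta_time ∧ delta_time ≤ 1460
instance (delta_time : Int) (is_rest : Bool) : Decidable (Pre_scheduling_reminder delta_time is_rest) := by unfold Pre_scheduling_reminder; infer_instance
def pvWitness_scheduling_reminder : Int × Bool := (7, false)

def Spec_scheduling_reminder (delta_time : Int) (is_rest : Bool) (out : String) : Prop := out = scheduling_reminder_alt delta_time is_rest
instance (delta_time : Int) (is_rest : Bool) (out : String) : Decidable (Spec_scheduling_reminder delta_time is_rest out) := by unfold Spec_scheduling_reminder; infer_instance

-- ===== CLAIM (what is proved, stated in full; the proofs are below) =====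
def Claim_equal_scheduling_reminder : Prop := ∀ (delta_time : Int) (is_rest : Bool), Dom_scheduling_reminder delta_time is_rest → Pre_scheduling_reminder delta_time is_rest → Spec_scheduling_reminder delta_time is_rest (scheduling_reminder delta_time is_rest)
-- ===== LEMMAS AND PROOFS =====

-- the message determined by the residue class of d mod 4
def schedMsg (d : Int) : String :=
  if d % 4 = 1 then "，你上白班"
  else if d % 4 = 2 then "，你上夜班"
  else if d % 4 = 3 then "，你休息的第一天"
  else "，你休息的最后一天"

theorem sched_fire (d a : Int) (init : Option String) (h1 : 4 * a + 1 ≤ d) (h2 : d ≤ 4 * a + 4) :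
    schedStep d init a = some (schedMsg d) := by
  have hv : d - a * 4 = 1 ∨ d - a * 4 = 2 ∨ d - a * 4 = 3 ∨ d - a * 4 = 4 := by omega
  rcases hv with h | h | h | h
  · have hm : d % 4 = 1 := by omega
    simp [schedStep, schedMsg, h, hm]
  · have hm : d % 4 = 2 := by omega
    simp [schedStep, schedMsg, h, hm]
  · have hm : d % 4 = 3 := by omega
    simp [schedStep, schedMsg, h, hm]
  · have hm : d % 4 = 0 := by omega
    simp [schedStep, schedMsg, h, hm]

theorem sched_skip (d : Int) (k : Nat) : ∀ (a : Int) (init : Option String), d ≤ 4 * a →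
    (PySem.List.pyRange a (a + (k : Int)) 1).foldl (schedStep d) init = init := by
  induction k with
  | zero =>
    intro a init _
    rw [PySem.List.pyRange_one_eq_nil (by omega : a + ((0 : Nat) : Int) ≤ a)]
    rfl
  | succ k ih =>
    intro a init hd
    rw [PySem.List.pyRange_one_cons (by push_cast; omega)]
    rw [List.foldl_cons]
    have hstep : schedStep d init a = init := by
      simp [schedStep, show d - a * 4 ≠ 1 by omega, show d - a * 4 ≠ 2 by omega,
        show d - a * 4 ≠ 3 by omega, show d - a * 4 ≠ 4 by omega]
    rw [hstep]
    have : a + ((k + 1 : Nat) : Int) = (a + 1) + (k : Int) := by push_cast; ring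
    rw [this]
    exact ih (a + 1) init (by omega)

theorem sched_fold (d : Int) (k : Nat) : ∀ (a : Int) (init : Option String),
    4 * a + 1 ≤ d → d ≤ 4 * (a + (k : Int)) →
    (PySem.List.pyRange a (a + (k : Int)) 1).foldl (schedStep d) init = some (schedMsg d) := by
  induction k with
  | zero => intro a init h1 h2; omega
  | succ k ih =>
    intro a init h1 h2
    rw [PySem.List.pyRange_one_cons (by push_cast; omega)]
    rw [List.foldl_cons]
    have hsplit : a + ((k + 1 : Nat) : Int) = (a + 1) + (k : Int) := by push_cast; ring
    by_cases h : d ≤ 4 * a + 4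
    · rw [sched_fire d a init h1 h, hsplit]
      exact sched_skip d k (a + 1) _ (by omega)
    · have hstep : schedStep d init a = init := by
        simp [schedStep, show d - a * 4 ≠ 1 by omega, show d - a * 4 ≠ 2 by omega,
          show d - a * 4 ≠ 3 by omega, show d - a * 4 ≠ 4 by omega]
      rw [hstep, hsplit]
      exact ih (a + 1) init (by omega) (by push_cast at h2 ⊢; omega)

theorem alt_eq_schedMsg (d : Int) (b : Bool) : scheduling_reminder_alt d b = schedMsg d := by
  have hr : d % 4 = 0 ∨ d % 4 = 1 ∨ d % 4 = 2 ∨ d % 4 = 3 := by omega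
  rcases hr with h | h | h | h <;>
    simp [scheduling_reminder_alt, schedMsg, h] <;> rfl

-- ===== VERDICT (by name: the statement is the Claim_ definition above) =====
theorem scheduling_reminder_spec : Claim_equal_scheduling_reminder := by
  intro d b _ hpre
  obtain ⟨h1, h2⟩ := hpre
  unfold Spec_scheduling_reminder
  rw [alt_eq_schedMsg]
  unfold scheduling_reminder
  have h365 : (365 : Int) = (0 : Int) + ((365 : Nat) : Int) := by norm_num
  rw [h365, sched_fold d 365 0 none (by omega) (by push_cast; omega)]
  rfl
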